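-- pv_equiv track=rewrite | github.com/sbstndb/subsetix | subsetix_cupy/benchmark_multishape.py | _rasterize_circles
-- ===== SOURCE A (Python) =====
-- import math
-- from typing import Iterable, List, Sequence, Tuple
--
-- Circle = Tuple[int, int, int]
--
-- def _merge_intervals(intervals: List[Tuple[int, int]]) -> List[Tuple[int, int]]:
--     if not intervals:
--         return []
--     intervals.sort()
--     merged = [list(intervals[0])]
--     for start, end in intervals[1:]:
--         if start <= merged[-1][1]:
--             merged[-1][1] = max(merged[-1][1], end)
--         else:
--             merged.append([start, end])
--     return [(s, e) for s, e in merged if s < e]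
--
-- def _accumulate_rows(height: int) -> List[List[Tuple[int, int]]]:
--     return [[] for _ in range(height)]
--
-- def _rasterize_circles(
--     circles: Sequence[Circle], width: int, height: int
-- ) -> List[List[Tuple[int, int]]]:
--     rows = _accumulate_rows(height)
--     for cx, cy, radius in circles:
--         if radius <= 0:
--             continue
--         y_min = max(0, cy - radius)
--         y_max = min(height - 1, cy + radius)
--         for y in range(y_min, y_max + 1):
--             dy = y - cy
--             span = int(math.floor(math.sqrt(max(0, radius * radius - dy * dy))))
--             x0 = max(0, cx - span)
--             x1 = min(width, cx + span + 1)
--             if x0 < x1: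
--                 rows[y].append((x0, x1))
--     return [_merge_intervals(row) for row in rows]
-- ===== SOURCE B (Python) =====
-- import math
--
--
-- def _rasterize_circles(circles, width, height):
--     # Row-major traversal: build each row's intervals directly, then merge them
--     # right-to-left with a monotonic stack (no mutable rows table).
--     def row_intervals(y):
--         out = []
--         for cx, cy, radius in circles:
--             if radius <= 0 or abs(y - cy) > radius:
--                 continue
--             dy = y - cy
--             span = int(math.floor(math.sqrt(radius * radius - dy * dy)))
--             x0 = max(0, cx - span)
--             x1 = min(width, cx + span + 1)
--             if x0 < x1:
--                 out.append((x0, x1))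
--         return out
--
--     def merge(ivs):
--         rev = []  # merged runs, rightmost run first; rev[-1] is the leftmost
--         for s, e in reversed(ivs):
--             while rev and rev[-1][0] <= e:
--                 e = max(e, rev.pop()[1])
--             rev.append((s, e))
--         return rev[::-1]
--
--     return [merge(sorted(row_intervals(y))) for y in range(height)]
-- ===== Notes on version B (the rewrite author's own statement) =====
-- stated objective: alternative
-- what changed: B traverses row-major (a direct per-row scan of the circles instead of A's mutable rows table updated circle-by-circle) and merges each row's sorted intervals right-to-left with a monotonic stack instead of A's left fold that mutates the last merged interval.
import Mathlib
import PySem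

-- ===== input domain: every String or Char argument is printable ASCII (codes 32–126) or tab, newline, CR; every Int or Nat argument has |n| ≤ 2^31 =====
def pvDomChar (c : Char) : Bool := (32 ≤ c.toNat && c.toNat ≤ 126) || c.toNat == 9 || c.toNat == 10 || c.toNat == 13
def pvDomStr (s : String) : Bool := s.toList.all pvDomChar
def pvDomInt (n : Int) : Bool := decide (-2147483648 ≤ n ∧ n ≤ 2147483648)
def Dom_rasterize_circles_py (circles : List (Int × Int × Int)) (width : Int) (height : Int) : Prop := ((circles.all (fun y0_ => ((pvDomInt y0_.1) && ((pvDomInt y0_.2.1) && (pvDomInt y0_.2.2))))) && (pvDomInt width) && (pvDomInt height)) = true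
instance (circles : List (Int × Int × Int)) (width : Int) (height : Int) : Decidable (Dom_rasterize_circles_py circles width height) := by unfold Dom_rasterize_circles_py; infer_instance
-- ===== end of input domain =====

-- B restructures A row-major (a per-row scan of the circles instead of A's mutable rows table) and merges each row's sorted intervals right-to-left with a monotonic stack (objective: alternative).

-- Python tuple sort is lexicographic; both intervals' components lie in [0, 2^31+1] on every
-- reachable call (x0 = max(0,..) ≥ 0, x1 ≤ width ≤ 2^31), where this injective monotone
-- integer key encodes the lexicographic order exactly.
def sortIntervalsLex (l : List (Int × Int)) : List (Int × Int) :=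
  PySem.List.sorted l (fun p => p.1 * 8589934592 + p.2) false

-- Hand port (used by BOTH ports: both Pythons compute int(math.floor(math.sqrt(n)))) of that
-- expression for n ≥ 0, in exact integer arithmetic: round the int to the nearest double
-- (ties to even), take the correctly rounded IEEE-754 sqrt on the 2^(f-52) grid of the
-- result's binade, floor. Exact for 0 ≤ n < 2^106; all reachable n are < 2^63.
def pyFloatSqrtFloorA (n : Int) : Int :=
  let x0 := n.toNat
  let x :=
    if x0 < 2 ^ 53 then x0
    else
      let sh := Nat.log2 x0 - 52
      let q := x0 / 2 ^ sh
      let r := x0 % 2 ^ sh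
      let half := 2 ^ (sh - 1)
      (if half < r ∨ (r = half ∧ q % 2 = 1) then q + 1 else q) * 2 ^ sh
  let f := Nat.log2 x / 2
  let t := 52 - f
  let m := x * 4 ^ t
  let k := Nat.sqrt m
  Int.ofNat ((if m ≤ k * (k + 1) then k else k + 1) / 2 ^ t)

-- ===== PORT A =====
-- _merge_intervals; the mutable 'merged' list (whose LAST element is updated in place) is
-- carried REVERSED, so merged[-1] is the head of the accumulator; reversed back at the end.
def mergeStepA (rev : List (Int × Int)) (p : Int × Int) : List (Int × Int) :=
  match rev with
  | [] => [p]
  | (ls, le) :: rest =>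
    if p.1 ≤ le then (ls, max le p.2) :: rest else p :: (ls, le) :: rest

def mergeIntervalsA (intervals : List (Int × Int)) : List (Int × Int) :=
  if intervals = [] then []
  else
    let sortedI := sortIntervalsLex intervals
    let revMerged := sortedI.tail.foldl mergeStepA [sortedI.headD (0, 0)]
    revMerged.reverse.filter (fun p => p.1 < p.2)

-- body of 'for y in range(y_min, y_max + 1)'; y is in [0, height) whenever the range is
-- nonempty, so rows[y] is List.modify at y.toNat (exact, no clamping possible).
def innerStepA (width : Int) (c : Int × Int × Int) (rows : List (List (Int × Int))) (y : Int) : List (List (Int × Int)) :=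
  let dy := y - c.2.1
  let span : Int := pyFloatSqrtFloorA (max 0 (c.2.2 * c.2.2 - dy * dy))
  let x0 := max 0 (c.1 - span)
  let x1 := min width (c.1 + span + 1)
  if x0 < x1 then rows.modify y.toNat (fun r => r ++ [(x0, x1)]) else rows

def stepCircleA (width height : Int) (rows : List (List (Int × Int))) (c : Int × Int × Int) : List (List (Int × Int)) :=
  if c.2.2 ≤ 0 then rows
  else
    let ymin := max 0 (c.2.1 - c.2.2)
    let ymax := min (height - 1) (c.2.1 + c.2.2)
    (PySem.List.pyRange ymin (ymax + 1) 1).foldl (innerStepA width c) rows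

def rasterize_circles_py (circles : List (Int × Int × Int)) (width : Int) (height : Int) : List (List (Int × Int)) :=
  let rows0 := (PySem.List.pyRange 0 height 1).map (fun _ => ([] : List (Int × Int)))
  let rows := circles.foldl (stepCircleA width height) rows0
  rows.map mergeIntervalsA

-- ===== PORT B =====
-- row_intervals(y): one left-to-right pass over the circles for a fixed row y
def rowStepB (width y : Int) (out : List (Int × Int)) (c : Int × Int × Int) : List (Int × Int) :=
  if c.2.2 ≤ 0 ∨ c.2.2 < |y - c.2.1| then out
  else
    let span : Int := pyFloatSqrtFloorA (c.2.2 * c.2.2 - (y - c.2.1) * (y - c.2.1))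
    let x0 := max 0 (c.1 - span)
    let x1 := min width (c.1 + span + 1)
    if x0 < x1 then out ++ [(x0, x1)] else out

def rowIntervalsB (circles : List (Int × Int × Int)) (width : Int) (y : Int) : List (Int × Int) :=
  circles.foldl (rowStepB width y) []

-- one step of merge's loop: the 'while rev and rev[-1][0] <= e' pops, then the append.
-- Python's stack 'rev' (top = rev[-1]) is stored REVERSED here, so its top is the head.
def absorbB (s e : Int) : List (Int × Int) → List (Int × Int)
  | [] => [(s, e)]
  | (s2, e2) :: tl => if s2 ≤ e then absorbB s (max e e2) tl else (s, e) :: (s2, e2) :: tl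

-- merge(ivs): a fold over reversed(ivs); since 'rev' is stored reversed, the returned
-- rev[::-1] is the accumulator itself
def mergeB (ivs : List (Int × Int)) : List (Int × Int) :=
  ivs.reverse.foldl (fun rev p => absorbB p.1 p.2 rev) []

def rasterize_circles_py_alt (circles : List (Int × Int × Int)) (width : Int) (height : Int) : List (List (Int × Int)) :=
  (PySem.List.pyRange 0 height 1).map
    (fun y => mergeB (sortIntervalsLex (rowIntervalsB circles width y)))

-- ===== PRECONDITION & SPEC =====
def Spec_rasterize_circles_py (circles : List (Int × Int × Int)) (width : Int) (height : Int) (out : List (List (Int × Int))) : Prop := out = rasterize_circles_py_alt circles width height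
instance (circles : List (Int × Int × Int)) (width : Int) (height : Int) (out : List (List (Int × Int))) : Decidable (Spec_rasterize_circles_py circles width height out) := by unfold Spec_rasterize_circles_py; infer_instance

-- ===== CLAIM (what is proved, stated in full; the proofs are below) =====
def Claim_equal_rasterize_circles_py : Prop := ∀ (circles : List (Int × Int × Int)) (width : Int) (height : Int), Dom_rasterize_circles_py circles width height → Spec_rasterize_circles_py circles width height (rasterize_circles_py circles width height)

-- ===== LEMMAS AND PROOFS =====

-- per-(circle, row) contribution, shaped like B's loop body
def contribB (width : Int) (c : Int × Int × Int) (y : Int) : List (Int × Int) :=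
  if c.2.2 ≤ 0 ∨ c.2.2 < |y - c.2.1| then []
  else
    let span : Int := pyFloatSqrtFloorA (c.2.2 * c.2.2 - (y - c.2.1) * (y - c.2.1))
    let x0 := max 0 (c.1 - span)
    let x1 := min width (c.1 + span + 1)
    if x0 < x1 then [(x0, x1)] else []

theorem rowStepB_eq (width y : Int) (out : List (Int × Int)) (c : Int × Int × Int) :
    rowStepB width y out c = out ++ contribB width c y := by
  by_cases h1 : c.2.2 ≤ 0 ∨ c.2.2 < |y - c.2.1| <;>
    simp [rowStepB, contribB, h1] <;> split_ifs <;> simp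

theorem rowIntervalsB_eq_flatMap (circles : List (Int × Int × Int)) (width y : Int) :
    rowIntervalsB circles width y = circles.flatMap (fun c => contribB width c y) := by
  suffices h : ∀ (cs : List (Int × Int × Int)) (acc : List (Int × Int)),
      cs.foldl (rowStepB width y) acc = acc ++ cs.flatMap (fun c => contribB width c y) by
    simpa using h circles []
  intro cs
  induction cs with
  | nil => intro acc; simp
  | cons c tl ih =>
    intro acc
    simp only [List.foldl_cons, rowStepB_eq, ih, List.flatMap_cons, List.append_assoc]

theorem contribB_valid (width : Int) (c : Int × Int × Int) (y : Int) :
    ∀ p ∈ contribB width c y, p.1 < p.2 := by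
  unfold contribB
  split_ifs with h1 h2 <;> simp_all

-- A's per-(circle,row) interval, with A's 'max 0' under the sqrt
def ivA (width : Int) (c : Int × Int × Int) (y : Int) : List (Int × Int) :=
  let dy := y - c.2.1
  let span : Int := pyFloatSqrtFloorA (max 0 (c.2.2 * c.2.2 - dy * dy))
  let x0 := max 0 (c.1 - span)
  let x1 := min width (c.1 + span + 1)
  if x0 < x1 then [(x0, x1)] else []

theorem map_modify (height lo : Int) (g : Int → List (Int × Int))
    (f : List (Int × Int) → List (Int × Int)) (h0 : 0 ≤ lo) (hlt : lo < height) :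
    ((PySem.List.pyRange 0 height 1).map g).modify lo.toNat f =
      (PySem.List.pyRange 0 height 1).map (fun z => if z = lo then f (g z) else g z) := by
  apply List.ext_getElem
  · simp only [List.length_modify, List.length_map]
  · intro i h1 h2
    have hi : i < height.toNat := by
      simpa [List.length_map, PySem.List.length_pyRange_one] using h2
    have hlen : i < (PySem.List.pyRange 0 height 1).length := by
      simpa [PySem.List.length_pyRange_one] using hi
    have hy : (PySem.List.pyRange 0 height 1)[i] = (0 : Int) + i :=
      PySem.List.getElem_pyRange_one 0 height i hlen
    rw [List.getElem_modify]
    by_cases hcase : lo.toNat = i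
    · have heq : ((i : Int)) = lo := by omega
      simp [hcase, List.getElem_map, hy, heq]
    · have hne : ((i : Int)) ≠ lo := by omega
      simp [hcase, List.getElem_map, hy, hne]

theorem innerStepA_on_map (width height : Int) (c : Int × Int × Int) (g : Int → List (Int × Int))
    (y : Int) (h0 : 0 ≤ y) (hlt : y < height) :
    innerStepA width c ((PySem.List.pyRange 0 height 1).map g) y =
      (PySem.List.pyRange 0 height 1).map (fun z => if z = y then g z ++ ivA width c z else g z) := by
  unfold innerStepA ivA
  by_cases hx : max 0 (c.1 - pyFloatSqrtFloorA (max 0 (c.2.2 * c.2.2 - (y - c.2.1) * (y - c.2.1)))) <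
      min width (c.1 + pyFloatSqrtFloorA (max 0 (c.2.2 * c.2.2 - (y - c.2.1) * (y - c.2.1))) + 1)
  · simp only [hx, if_pos]
    rw [map_modify height y g _ h0 hlt]
    apply List.map_congr_left
    intro z hz
    by_cases hzy : z = y
    · subst hzy
      rw [if_pos hx]
    · simp [hzy]
  · rw [if_neg hx]
    apply Eq.symm
    apply List.map_congr_left
    intro z hz
    by_cases hzy : z = y
    · subst hzy
      rw [if_neg hx]
      simp
    · simp [hzy]

theorem innerFoldA (width height : Int) (c : Int × Int × Int) (ymax : Int)
    (hym : ymax + 1 ≤ height) :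
    ∀ (n : Nat) (lo : Int) (g : Int → List (Int × Int)), 0 ≤ lo → (ymax + 1 - lo).toNat = n →
    (PySem.List.pyRange lo (ymax + 1) 1).foldl (innerStepA width c)
        ((PySem.List.pyRange 0 height 1).map g) =
      (PySem.List.pyRange 0 height 1).map
        (fun z => if lo ≤ z ∧ z ≤ ymax then g z ++ ivA width c z else g z) := by
  intro n
  induction n with
  | zero =>
    intro lo g h0 hn
    have hnil : PySem.List.pyRange lo (ymax + 1) 1 = [] := PySem.List.pyRange_one_eq_nil (by omega)
    rw [hnil]
    simp only [List.foldl_nil]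
    apply List.map_congr_left
    intro z hz
    have : ¬ (lo ≤ z ∧ z ≤ ymax) := by omega
    simp [this]
  | succ n ih =>
    intro lo g h0 hn
    have hlt : lo < ymax + 1 := by omega
    rw [PySem.List.pyRange_one_cons hlt]
    simp only [List.foldl_cons]
    rw [innerStepA_on_map width height c g lo h0 (by omega)]
    rw [ih (lo + 1) _ (by omega) (by omega)]
    apply List.map_congr_left
    intro z hz
    by_cases hzy : z = lo
    · have hA : ¬ (lo + 1 ≤ z ∧ z ≤ ymax) := by omega
      have hB : lo ≤ z ∧ z ≤ ymax := by omega
      rw [if_neg hA, if_pos hB, if_pos hzy]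
    · simp only [if_neg hzy]
      by_cases hc : lo ≤ z ∧ z ≤ ymax
      · have hc2 : lo + 1 ≤ z ∧ z ≤ ymax := by omega
        rw [if_pos hc, if_pos hc2]
      · have hc2 : ¬ (lo + 1 ≤ z ∧ z ≤ ymax) := by omega
        rw [if_neg hc, if_neg hc2]

theorem stepCircleA_on_map (width height : Int) (c : Int × Int × Int) (g : Int → List (Int × Int)) :
    stepCircleA width height ((PySem.List.pyRange 0 height 1).map g) c =
      (PySem.List.pyRange 0 height 1).map (fun y => g y ++ contribB width c y) := by
  unfold stepCircleA
  by_cases hr : c.2.2 ≤ 0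
  · rw [if_pos hr]
    apply Eq.symm
    apply List.map_congr_left
    intro z hz
    simp [contribB, hr]
  · rw [if_neg hr]
    rw [innerFoldA width height c (min (height - 1) (c.2.1 + c.2.2)) (by omega)
        ((min (height - 1) (c.2.1 + c.2.2) + 1 - max 0 (c.2.1 - c.2.2)).toNat)
        (max 0 (c.2.1 - c.2.2)) g (by omega) rfl]
    apply List.map_congr_left
    intro z hz
    have hz' : 0 ≤ z ∧ z < height := PySem.List.mem_pyRange_one.mp hz
    by_cases hcond : max 0 (c.2.1 - c.2.2) ≤ z ∧ z ≤ min (height - 1) (c.2.1 + c.2.2)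
    · rw [if_pos hcond]
      have habs : |z - c.2.1| ≤ c.2.2 := by
        rcases abs_cases (z - c.2.1) with ⟨h1, h2⟩ | ⟨h1, h2⟩ <;> omega
      have hnc : ¬ (c.2.2 ≤ 0 ∨ c.2.2 < |z - c.2.1|) := by
        push Not
        exact ⟨by omega, habs⟩
      have hsq : (z - c.2.1) * (z - c.2.1) ≤ c.2.2 * c.2.2 := by
        calc (z - c.2.1) * (z - c.2.1) = |z - c.2.1| * |z - c.2.1| := (abs_mul_abs_self _).symm
          _ ≤ c.2.2 * c.2.2 :=
            mul_self_le_mul_self (abs_nonneg _) habs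
      have hmax : max 0 (c.2.2 * c.2.2 - (z - c.2.1) * (z - c.2.1))
          = c.2.2 * c.2.2 - (z - c.2.1) * (z - c.2.1) := max_eq_right (by omega)
      unfold ivA contribB
      rw [if_neg hnc]
      simp only [hmax]
    · rw [if_neg hcond]
      have habs : c.2.2 < |z - c.2.1| := by
        rcases abs_cases (z - c.2.1) with ⟨h1, h2⟩ | ⟨h1, h2⟩ <;> omega
      have hc2 : (c.2.2 ≤ 0 ∨ c.2.2 < |z - c.2.1|) := Or.inr habs
      unfold contribB
      rw [if_pos hc2]
      simp

theorem foldl_stepCircleA (width height : Int) (circles : List (Int × Int × Int))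
    (g : Int → List (Int × Int)) :
    circles.foldl (stepCircleA width height) ((PySem.List.pyRange 0 height 1).map g) =
      (PySem.List.pyRange 0 height 1).map
        (fun y => g y ++ circles.flatMap (fun c => contribB width c y)) := by
  induction circles generalizing g with
  | nil =>
    apply Eq.symm
    apply List.map_congr_left
    intro z hz
    simp
  | cons c tl ih =>
    simp only [List.foldl_cons]
    rw [stepCircleA_on_map width height c g, ih]
    apply List.map_congr_left
    intro z hz
    simp [List.append_assoc]

-- A's fold-with-mutable-last as a head recursion
def mergeCore : List (Int × Int) → List (Int × Int)
  | [] => []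
  | [p] => [p]
  | (s1, e1) :: (s2, e2) :: tl =>
    if s2 ≤ e1 then mergeCore ((s1, max e1 e2) :: tl)
    else (s1, e1) :: mergeCore ((s2, e2) :: tl)
  termination_by l => l.length
  decreasing_by all_goals (simp; try omega)

theorem foldMerge_eq (rest : List (Int × Int)) :
    ∀ (ls le : Int) (doneRev : List (Int × Int)),
    (rest.foldl mergeStepA ((ls, le) :: doneRev)).reverse
      = doneRev.reverse ++ mergeCore ((ls, le) :: rest) := by
  induction rest with
  | nil => intro ls le doneRev; simp [mergeCore]
  | cons p tl ih =>
    intro ls le doneRev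
    obtain ⟨s2, e2⟩ := p
    by_cases hle : s2 ≤ le
    · rw [show ((s2, e2) :: tl).foldl mergeStepA ((ls, le) :: doneRev)
            = tl.foldl mergeStepA ((ls, max le e2) :: doneRev) from by simp [mergeStepA, hle]]
      rw [ih ls (max le e2) doneRev]
      rw [show mergeCore ((ls, le) :: (s2, e2) :: tl) = mergeCore ((ls, max le e2) :: tl) from by
        simp [mergeCore, hle]]
    · rw [show ((s2, e2) :: tl).foldl mergeStepA ((ls, le) :: doneRev)
            = tl.foldl mergeStepA ((s2, e2) :: (ls, le) :: doneRev) from by simp [mergeStepA, hle]]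
      rw [ih s2 e2 ((ls, le) :: doneRev)]
      rw [show mergeCore ((ls, le) :: (s2, e2) :: tl) = (ls, le) :: mergeCore ((s2, e2) :: tl) from by
        simp [mergeCore, hle]]
      simp

theorem sortIntervalsLex_nil : sortIntervalsLex [] = [] := by
  have h := PySem.List.sorted_perm ([] : List (Int × Int)) (fun p => p.1 * 8589934592 + p.2) false
  exact h.eq_nil

theorem mergeIntervalsA_eq_core (l : List (Int × Int)) :
    mergeIntervalsA l = (mergeCore (sortIntervalsLex l)).filter (fun p => p.1 < p.2) := by
  by_cases hl : l = []
  · subst hl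
    simp [mergeIntervalsA, sortIntervalsLex_nil, mergeCore]
  · obtain ⟨hd, tl, hst⟩ : ∃ hd tl, sortIntervalsLex l = hd :: tl := by
      cases hs : sortIntervalsLex l with
      | nil =>
        exfalso
        have h := PySem.List.sorted_perm l (fun p : Int × Int => p.1 * 8589934592 + p.2) false
        rw [show PySem.List.sorted l (fun p : Int × Int => p.1 * 8589934592 + p.2) false = sortIntervalsLex l from rfl, hs] at h
        exact hl h.symm.eq_nil
      | cons a b => exact ⟨a, b, rfl⟩
    obtain ⟨ls, le⟩ := hd
    simp only [mergeIntervalsA, hl, hst]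
    have := foldMerge_eq tl ls le []
    simp only [List.reverse_nil, List.nil_append] at this
    simp [this]

theorem mergeCore_valid (M : List (Int × Int)) (h : ∀ p ∈ M, p.1 < p.2) :
    ∀ p ∈ mergeCore M, p.1 < p.2 := by
  fun_induction mergeCore M with
  | case1 => simpa using h
  | case2 p => simpa using h
  | case3 s1 e1 s2 e2 tl hle ih =>
    refine ih ?_
    intro p hp
    rcases List.mem_cons.mp hp with rfl | hp
    · have h1 := h (s1, e1) (by simp)
      have h2 := h (s2, e2) (by simp)
      simp at h1 h2 ⊢
      omega
    · exact h p (by simp [hp])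
  | case4 s1 e1 s2 e2 tl hgt ih =>
    intro p hp
    rcases List.mem_cons.mp hp with hp | hp
    · subst hp; exact h (s1, e1) (by simp)
    · exact ih (fun q hq => h q (List.mem_cons_of_mem _ hq)) p hp

theorem absorbB_shape (s e : Int) (X : List (Int × Int)) :
    ∃ E X', absorbB s e X = (s, E) :: X' := by
  induction X generalizing e with
  | nil => exact ⟨e, [], rfl⟩
  | cons hd tl ih =>
    obtain ⟨a, b⟩ := hd
    by_cases hab : a ≤ e
    · simpa [absorbB, hab] using ih (max e b)
    · exact ⟨e, (a, b) :: tl, by simp [absorbB, hab]⟩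

theorem absorbB_compose (s1 e1 s2 e2 : Int) (X : List (Int × Int)) (h : s2 ≤ e1) :
    absorbB s1 e1 (absorbB s2 e2 X) = absorbB s1 (max e1 e2) X := by
  induction X generalizing e2 with
  | nil =>
    simp [absorbB, h]
  | cons hd tl ih =>
    obtain ⟨a, b⟩ := hd
    by_cases hab : a ≤ e2
    · have h2 : a ≤ max e1 e2 := le_trans hab (le_max_right _ _)
      rw [show absorbB s2 e2 ((a, b) :: tl) = absorbB s2 (max e2 b) tl from by simp [absorbB, hab],
          ih (max e2 b),
          show absorbB s1 (max e1 e2) ((a, b) :: tl) = absorbB s1 (max (max e1 e2) b) tl from by simp [absorbB, h2]]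
      rw [max_assoc]
    · rw [show absorbB s2 e2 ((a, b) :: tl) = (s2, e2) :: (a, b) :: tl from by simp [absorbB, hab]]
      simp [absorbB, h, hab]

-- mergeB as the head recursion it folds up to (foldl over the reversed list = foldr)
def mergeBRec : List (Int × Int) → List (Int × Int)
  | [] => []
  | (s, e) :: tl => absorbB s e (mergeBRec tl)

theorem mergeB_eq_rec (ivs : List (Int × Int)) : mergeB ivs = mergeBRec ivs := by
  unfold mergeB
  rw [List.foldl_reverse]
  induction ivs with
  | nil => rfl
  | cons p tl ih => rw [List.foldr_cons, ih]; rfl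

theorem mergeCore_eq_mergeBRec (M : List (Int × Int)) : mergeCore M = mergeBRec M := by
  fun_induction mergeCore M with
  | case1 => rfl
  | case2 p => obtain ⟨s, e⟩ := p; rfl
  | case3 s1 e1 s2 e2 tl hle ih =>
    rw [ih]
    show absorbB s1 (max e1 e2) (mergeBRec tl) = mergeBRec ((s1, e1) :: (s2, e2) :: tl)
    rw [show mergeBRec ((s1, e1) :: (s2, e2) :: tl)
          = absorbB s1 e1 (absorbB s2 e2 (mergeBRec tl)) from rfl,
        absorbB_compose s1 e1 s2 e2 _ hle]
  | case4 s1 e1 s2 e2 tl hgt ih =>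
    rw [ih]
    show (s1, e1) :: mergeBRec ((s2, e2) :: tl) = absorbB s1 e1 (mergeBRec ((s2, e2) :: tl))
    obtain ⟨E, X', hX⟩ := absorbB_shape s2 e2 (mergeBRec tl)
    rw [show mergeBRec ((s2, e2) :: tl) = absorbB s2 e2 (mergeBRec tl) from rfl, hX]
    simp [absorbB]
    omega

theorem mergeCore_eq_mergeB (M : List (Int × Int)) : mergeCore M = mergeB M := by
  rw [mergeB_eq_rec]
  exact mergeCore_eq_mergeBRec M

theorem sortIntervalsLex_mem (l : List (Int × Int)) (p : Int × Int) :
    p ∈ sortIntervalsLex l ↔ p ∈ l :=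
  PySem.List.mem_sorted l _ false p

-- ===== VERDICT (by name: the statement is the Claim_ definition above) =====
theorem rasterize_circles_py_spec : Claim_equal_rasterize_circles_py := by
  intro circles width height _hdom
  unfold Spec_rasterize_circles_py rasterize_circles_py rasterize_circles_py_alt
  show (circles.foldl (stepCircleA width height)
        ((PySem.List.pyRange 0 height 1).map (fun _ => ([] : List (Int × Int))))).map mergeIntervalsA
      = _
  rw [foldl_stepCircleA width height circles (fun _ => []), List.map_map]
  apply List.map_congr_left
  intro y _hy
  simp only [Function.comp, List.nil_append]
  rw [rowIntervalsB_eq_flatMap]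
  have hvalid : ∀ p ∈ sortIntervalsLex (circles.flatMap (fun c => contribB width c y)), p.1 < p.2 := by
    intro p hp
    rw [sortIntervalsLex_mem] at hp
    obtain ⟨c, _hc, hpc⟩ := List.mem_flatMap.mp hp
    exact contribB_valid width c y p hpc
  rw [mergeIntervalsA_eq_core,
      List.filter_eq_self.mpr (fun p hp => decide_eq_true (mergeCore_valid _ hvalid p hp)),
      mergeCore_eq_mergeB]
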